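-- pv_equiv track=rewrite | github.com/heemankv/Distributed_Systems_3BHK | Assignment_3/mapper.py | create_partitions
-- ===== SOURCE A (Python) =====
-- def create_partitions(assignments, no_of_reducers):
--     '''
--     In this step, you will write a function that takes the list of key-value pairs generated by the Map function and partitions them into smaller partitions.
--     The partitioning function should ensure that all key-value pairs with the same key are sent to the same partition.
--     Each partition is picked up by a specific reducer during shuffling and sorting.
--     If there are M mappers and R reducers, each mapper should have R file partitions.
--     '''
--     # number of partitions = number of reducers
--     partitions = {}
--     for i in range(no_of_reducers):
--         partitions[i] = []
--     for assignment in assignments: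
--         # assignment[0] is the closest centroid index, which will be used to partition the data
--         # formula : assignment[0] % no_of_reducers
--         # explanation: if there are 3 reducers, then the closest centroid index will be divided by 3 and the remainder will be used to assign the partition
--         partition_idx = assignment[0] % no_of_reducers
--         partitions[partition_idx].append(assignment)
--     return partitions
-- ===== SOURCE B (Python) =====
-- def create_partitions(assignments, no_of_reducers):
--     # gather per reducer: compute each assignment's partition index once up front,
--     # then build every bucket by a filter over that indexed list
--     idx = [(a[0] % no_of_reducers, a) for a in assignments]
--     return {i: [a for k, a in idx if k == i] for i in range(no_of_reducers)}
-- ===== Notes on version B (the rewrite author's own statement) =====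
-- stated objective: alternative
-- what changed: A's single scatter pass that appends each assignment into a pre-built dict of buckets is replaced by a gather strategy: partition indices are computed once up front, then every bucket is built by a filter comprehension over that indexed list.
import Mathlib
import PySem

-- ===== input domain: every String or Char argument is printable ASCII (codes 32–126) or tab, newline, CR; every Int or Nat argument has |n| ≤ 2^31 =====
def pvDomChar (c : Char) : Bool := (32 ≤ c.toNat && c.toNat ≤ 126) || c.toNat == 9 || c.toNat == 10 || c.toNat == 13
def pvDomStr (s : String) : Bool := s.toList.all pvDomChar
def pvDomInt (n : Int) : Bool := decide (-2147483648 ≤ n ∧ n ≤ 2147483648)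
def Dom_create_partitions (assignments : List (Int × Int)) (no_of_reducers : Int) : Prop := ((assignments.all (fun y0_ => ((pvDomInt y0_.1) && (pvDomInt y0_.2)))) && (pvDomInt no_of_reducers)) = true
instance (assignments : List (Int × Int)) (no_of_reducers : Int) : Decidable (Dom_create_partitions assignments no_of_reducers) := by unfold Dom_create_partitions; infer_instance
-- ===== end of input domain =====

-- B replaces A's scatter-into-dict-buckets pass by a gather (index once, then one filter
-- per reducer); same return value, a different decomposition of the same cost class.

-- ===== PORT A =====
def create_partitions (assignments : List (Int × Int)) (no_of_reducers : Int) : List (Int × List (Int × Int)) :=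
  let init : PySem.Dict Int (List (Int × Int)) :=
    (PySem.List.pyRange 0 no_of_reducers 1).foldl
      (fun d i => d.insert i ([] : List (Int × Int))) PySem.Dict.empty
  -- partitions[partition_idx].append(assignment); key always present under Pre_
  (assignments.foldl
    (fun d a => d.modify (PySem.Int.mod a.1 no_of_reducers) [] (fun l => l ++ [a])) init).items

-- ===== PORT B =====
def create_partitions_alt (assignments : List (Int × Int)) (no_of_reducers : Int) : List (Int × List (Int × Int)) :=
  let idx := assignments.map (fun a => (PySem.Int.mod a.1 no_of_reducers, a))
  (PySem.List.pyRange 0 no_of_reducers 1).map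
    (fun i => (i, (idx.filter (fun p => p.1 == i)).map (fun p => p.2)))

-- ===== PRECONDITION & SPEC =====
-- Pre_ excludes exactly the inputs on which Python A raises: a non-positive reducer
-- count with a non-empty assignment list (ZeroDivisionError for 0, KeyError for < 0).
def Pre_create_partitions (assignments : List (Int × Int)) (no_of_reducers : Int) : Prop :=
  1 ≤ no_of_reducers ∨ assignments = []
instance (assignments : List (Int × Int)) (no_of_reducers : Int) : Decidable (Pre_create_partitions assignments no_of_reducers) := by unfold Pre_create_partitions; infer_instance

def pvWitness_create_partitions : (List (Int × Int)) × Int := ([(0, 1), (1, 2), (5, 3), (-4, 0)], 2)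

def Spec_create_partitions (assignments : List (Int × Int)) (no_of_reducers : Int) (out : List (Int × List (Int × Int))) : Prop := out = create_partitions_alt assignments no_of_reducers
instance (assignments : List (Int × Int)) (no_of_reducers : Int) (out : List (Int × List (Int × Int))) : Decidable (Spec_create_partitions assignments no_of_reducers out) := by unfold Spec_create_partitions; infer_instance

-- ===== CLAIM (what is proved, stated in full; the proofs are below) =====
def Claim_equal_create_partitions : Prop := ∀ (assignments : List (Int × Int)) (no_of_reducers : Int), Dom_create_partitions assignments no_of_reducers → Pre_create_partitions assignments no_of_reducers → Spec_create_partitions assignments no_of_reducers (create_partitions assignments no_of_reducers)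

-- ===== LEMMAS AND PROOFS =====

-- inserting a fresh key appends it
theorem items_insert_fresh (d : PySem.Dict Int (List (Int × Int))) (k : Int)
    (v : List (Int × Int)) (h : k ∉ d.keys) :
    (d.insert k v).items = d.items ++ [(k, v)] := by
  have hc : d.contains k = false := by
    by_contra hcon
    rw [Bool.not_eq_false] at hcon
    simp only [PySem.Dict.contains, List.any_eq_true] at hcon
    obtain ⟨p, hp, hpk⟩ := hcon
    exact h (by simp only [PySem.Dict.keys, List.mem_map]; exact ⟨p, hp, beq_iff_eq.mp hpk⟩)
  simp [PySem.Dict.insert, hc]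

-- A's initialization loop builds the literal association list R.map (i, [])
theorem items_init (R : List Int) : ∀ (d : PySem.Dict Int (List (Int × Int))),
    (∀ i ∈ R, i ∉ d.keys) → R.Nodup →
    (R.foldl (fun d i => d.insert i ([] : List (Int × Int))) d).items
      = d.items ++ R.map (fun i => (i, ([] : List (Int × Int)))) := by
  induction R with
  | nil => intro d _ _; simp
  | cons k R ih =>
    intro d hfresh hnd
    have hk : k ∉ d.keys := hfresh k (by simp)
    have hstep : (d.insert k ([] : List (Int × Int))).items = d.items ++ [(k, [])] :=
      items_insert_fresh d k [] hk
    have hkeys : (d.insert k ([] : List (Int × Int))).keys = d.keys ++ [k] := by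
      simp [PySem.Dict.keys, hstep]
    rw [List.foldl_cons, ih (d.insert k []) ?_ (List.nodup_cons.mp hnd).2, hstep]
    · simp
    · intro i hi
      rw [hkeys]
      simp only [List.mem_append, List.mem_singleton]
      rintro (h1 | h1)
      · exact hfresh i (by simp [hi]) h1
      · exact (List.nodup_cons.mp hnd).1 (h1 ▸ hi)

-- getD with default [] on a dict whose every value is [] gives []
theorem getD_init (R : List Int) (k : Int) :
    (PySem.Dict.mk (R.map (fun i => (i, ([] : List (Int × Int)))))).getD k [] = [] := by
  induction R with
  | nil => simp [PySem.Dict.getD, PySem.Dict.get?]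
  | cons j R ih =>
    by_cases hjk : j = k
    · simp [PySem.Dict.getD, PySem.Dict.get?_mk_cons, hjk]
    · simpa [PySem.Dict.getD, PySem.Dict.get?_mk_cons, hjk] using ih

-- a dict with Nodup keys is determined entry-wise by keys and getD
theorem items_eq_keys_map : ∀ (l : List (Int × List (Int × Int))),
    (l.map Prod.fst).Nodup →
    l = (l.map Prod.fst).map (fun k => (k, (PySem.Dict.mk l).getD k [])) := by
  intro l
  induction l with
  | nil => intro _; rfl
  | cons p rest ih =>
    intro hnd
    obtain ⟨k, v⟩ := p
    simp only [List.map_cons, List.nodup_cons] at hnd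
    simp only [List.map_cons, List.cons_eq_cons]
    constructor
    · simp [PySem.Dict.getD, PySem.Dict.get?_mk_cons]
    · have := ih hnd.2
      conv_lhs => rw [this]
      apply List.map_congr_left
      intro k' hk'
      have hne : ¬ (k = k') := fun h => hnd.1 (h ▸ hk')
      simp [PySem.Dict.getD, PySem.Dict.get?_mk_cons, hne]

-- Set.update is the identity when every element is already present
theorem set_update_of_mem (xs : List Int) : ∀ (s : PySem.Set Int),
    (∀ x ∈ xs, x ∈ s) → PySem.Set.update s xs = s := by
  induction xs with
  | nil => intro s _; rfl
  | cons x xs ih =>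
    intro s hmem
    have hx : PySem.Set.add s x = s := by
      simp [PySem.Set.add, PySem.Set.contains, hmem x (by simp)]
    simp only [PySem.Set.update, List.foldl_cons]
    rw [show List.foldl PySem.Set.add (PySem.Set.add s x) xs
          = PySem.Set.update (PySem.Set.add s x) xs from rfl, hx]
    exact ih s (fun y hy => hmem y (by simp [hy]))

-- the core equality, assuming every computed partition index is an initialized key
theorem create_partitions_eq_alt (assignments : List (Int × Int)) (n : Int)
    (H : ∀ a ∈ assignments, PySem.Int.mod a.1 n ∈ PySem.List.pyRange 0 n 1) :
    create_partitions assignments n = create_partitions_alt assignments n := by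
  unfold create_partitions create_partitions_alt
  set R := PySem.List.pyRange 0 n 1 with hR
  set idx := assignments.map (fun a => (PySem.Int.mod a.1 n, a)) with hidx
  have hinit : (R.foldl (fun d i => d.insert i ([] : List (Int × Int)))
      PySem.Dict.empty) = PySem.Dict.mk (R.map (fun i => (i, []))) := by
    apply PySem.Dict.ext
    rw [items_init R PySem.Dict.empty (by intro i _; simp [PySem.Dict.keys, PySem.Dict.empty])
        (hR ▸ PySem.List.nodup_pyRange_one 0 n)]
    simp [PySem.Dict.empty]
  simp only [hinit]
  -- rewrite A's fold over assignments as a fold over the indexed list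
  have hfold : assignments.foldl
      (fun d a => d.modify (PySem.Int.mod a.1 n) [] (fun l => l ++ [a]))
      (PySem.Dict.mk (R.map (fun i => (i, []))))
      = idx.foldl (fun d p => d.modify p.1 [] (fun l => l ++ [p.2]))
          (PySem.Dict.mk (R.map (fun i => (i, [])))) := by
    rw [hidx, List.foldl_map]
  rw [hfold]
  set F := idx.foldl (fun d p => d.modify p.1 [] (fun l => l ++ [p.2]))
      (PySem.Dict.mk (R.map (fun i => (i, [])))) with hF
  have hkeys : F.keys = R := by
    have h1 := PySem.Dict.keys_foldl_modify_key idx Prod.fst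
      ([] : List (Int × Int)) (fun _ p => fun l => l ++ [p.2])
      (PySem.Dict.mk (R.map (fun i => (i, []))))
    have hbase : (PySem.Dict.mk (R.map (fun i => (i, ([] : List (Int × Int)))))).keys = R := by
      show List.map (fun x => x.1) (List.map (fun i => (i, ([] : List (Int × Int)))) R) = R
      rw [List.map_map]
      exact List.map_id R
    rw [hF, h1, hbase, set_update_of_mem]
    intro x hx
    rw [hidx] at hx
    simp only [List.map_map, List.mem_map, Function.comp] at hx
    rcases hx with ⟨a, ha, rfl⟩
    exact H a ha
  have hgetD : ∀ k, F.getD k [] = (idx.filter (fun p => p.1 == k)).map (fun p => p.2) := by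
    intro k
    rw [hF, PySem.Dict.getD_foldl_modify_append idx
      (PySem.Dict.mk (R.map (fun i => (i, [])))) k, getD_init]
    simp
  have hnd : (F.items.map Prod.fst).Nodup := by
    have : F.items.map Prod.fst = F.keys := rfl
    rw [this, hkeys, hR]
    exact PySem.List.nodup_pyRange_one 0 n
  calc F.items
      = (F.items.map Prod.fst).map (fun k => (k, (PySem.Dict.mk F.items).getD k [])) :=
        items_eq_keys_map F.items hnd
    _ = R.map (fun k => (k, F.getD k [])) := by
        have h1 : F.items.map Prod.fst = F.keys := rfl
        have h2 : PySem.Dict.mk F.items = F := rfl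
        rw [h1, h2, hkeys]
    _ = R.map (fun i => (i, (idx.filter (fun p => p.1 == i)).map (fun p => p.2))) := by
        apply List.map_congr_left
        intro k _
        rw [hgetD k]

-- ===== VERDICT (by name: the statement is the Claim_ definition above) =====
theorem create_partitions_spec : Claim_equal_create_partitions := by
  intro assignments n _ hpre
  unfold Spec_create_partitions
  apply create_partitions_eq_alt
  intro a ha
  rcases hpre with hn | hnil
  · have h0 : (0 : Int) < n := by omega
    exact PySem.List.mem_pyRange_one.mpr ⟨PySem.Int.mod_nonneg a.1 h0, PySem.Int.mod_lt a.1 h0⟩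
  · subst hnil; cases ha
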